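-- pv_equiv track=rewrite | github.com/pypi-data/pypi-mirror-401 | packages/basicthainlp/basicthainlp-0.5.6.tar.gz/basicthainlp-0.5.6/src/basicthainlp/posTag/PosTag.py | psSeg2WS
-- ===== SOURCE A (Python) =====
-- def psSeg2WS(psList,posList):
--     resWs = []
--     resPos = []
--     word = ''
--     posTmp = ''
--     for ps,pos in zip(psList,posList):
--         if pos.startswith('B'):
--             if word != '':
--                 resWs.append(word)
--                 resPos.append(posTmp)
--             word = ps
--             posTmp = pos[2:]
--         else:
--             word += ps
--     if word != '':
--         resWs.append(word)
--         resPos.append(posTmp)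
--     return resWs,resPos
-- ===== SOURCE B (Python) =====
-- def psSeg2WS(psList, posList):
--     # Group-then-join: split the zipped stream into groups starting at each
--     # B-tagged element (plus a possible leading non-B run), then join and filter.
--     def span_nonB(pairs):
--         for k, (_, pos) in enumerate(pairs):
--             if pos.startswith('B'):
--                 return pairs[:k], pairs[k:]
--         return pairs, []
--
--     def groups(pairs):
--         if not pairs:
--             return []
--         (ps, pos), rest = pairs[0], pairs[1:]
--         run, rest2 = span_nonB(rest)
--         label = pos[2:] if pos.startswith('B') else ''
--         word = ps + ''.join(p for p, _ in run)
--         return [(word, label)] + groups(rest2)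
--
--     res = [(w, l) for (w, l) in groups(list(zip(psList, posList))) if w != '']
--     return [w for w, _ in res], [l for _, l in res]
-- ===== Notes on version B (the rewrite author's own statement) =====
-- stated objective: alternative
-- what changed: Replaced A's flush-on-the-fly accumulator loop (mutable word/posTmp with a trailing flush) by a two-phase group-then-join pass: a recursive span-based grouping of the zipped stream at B-tagged boundaries, then a join+filter emission.
import Mathlib
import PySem

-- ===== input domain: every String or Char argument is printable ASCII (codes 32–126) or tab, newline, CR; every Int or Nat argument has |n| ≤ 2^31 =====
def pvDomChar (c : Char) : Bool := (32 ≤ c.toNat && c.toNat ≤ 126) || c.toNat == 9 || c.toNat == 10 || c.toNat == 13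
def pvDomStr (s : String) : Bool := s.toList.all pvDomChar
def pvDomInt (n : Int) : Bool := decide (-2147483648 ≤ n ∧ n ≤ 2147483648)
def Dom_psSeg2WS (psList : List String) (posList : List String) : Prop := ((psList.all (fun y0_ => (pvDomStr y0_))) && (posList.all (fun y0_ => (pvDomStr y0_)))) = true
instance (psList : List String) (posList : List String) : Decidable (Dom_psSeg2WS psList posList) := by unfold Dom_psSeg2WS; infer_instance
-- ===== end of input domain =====

-- B replaces A's flush-on-the-fly accumulator loop by a two-phase group-then-join pass (alternative decomposition, same cost).

-- ===== PORT A =====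
-- one loop step of A's for-loop (state: resWs, resPos, word, posTmp)
def pvStepA (st : List String × List String × String × String) (pr : String × String) :
    List String × List String × String × String :=
  match st, pr with
  | (resWs, resPos, word, posTmp), (ps, pos) =>
    if PySem.Str.startswith pos "B" then
      if word ≠ "" then
        (resWs ++ [word], resPos ++ [posTmp], ps, PySem.Str.slice pos (some 2) none)
      else
        (resWs, resPos, ps, PySem.Str.slice pos (some 2) none)
    else
      (resWs, resPos, word ++ ps, posTmp)

-- the trailing 'if word != ""' flush
def pvFinA (st : List String × List String × String × String) : List String × List String :=
  if st.2.2.1 ≠ "" then (st.1 ++ [st.2.2.1], st.2.1 ++ [st.2.2.2]) else (st.1, st.2.1)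

def psSeg2WS (psList : List String) (posList : List String) : List String × List String :=
  pvFinA ((psList.zip posList).foldl pvStepA ([], [], "", ""))

-- ===== PORT B =====
-- span_nonB: longest prefix of non-B-tagged pairs, and the remainder
def pvSpanNonB (pairs : List (String × String)) :
    List (String × String) × List (String × String) :=
  pairs.span (fun pr => !PySem.Str.startswith pr.2 "B")

-- groups: recursively peel one group (head element plus its following non-B run)
def pvGroupsB : List (String × String) → List (String × String)
  | [] => []
  | (ps, pos) :: rest =>
    let sp := pvSpanNonB rest
    let label := if PySem.Str.startswith pos "B" then PySem.Str.slice pos (some 2) none else ""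
    let word := ps ++ PySem.Str.join "" (sp.1.map (·.1))
    (word, label) :: pvGroupsB sp.2
termination_by pairs => pairs.length
decreasing_by
  simp only [pvSpanNonB, List.span_eq_takeWhile_dropWhile]
  exact Nat.lt_succ_of_le (List.length_dropWhile_le _ _)

def psSeg2WS_alt (psList : List String) (posList : List String) : List String × List String :=
  let res := (pvGroupsB (psList.zip posList)).filter (fun g => g.1 ≠ "")
  (res.map (·.1), res.map (·.2))

-- ===== PRECONDITION & SPEC =====
def Spec_psSeg2WS (psList : List String) (posList : List String) (out : List String × List String) : Prop := out = psSeg2WS_alt psList posList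
instance (psList : List String) (posList : List String) (out : List String × List String) : Decidable (Spec_psSeg2WS psList posList out) := by unfold Spec_psSeg2WS; infer_instance

-- ===== CLAIM (what is proved, stated in full; the proofs are below) =====
def Claim_equal_psSeg2WS : Prop := ∀ (psList : List String) (posList : List String), Dom_psSeg2WS psList posList → Spec_psSeg2WS psList posList (psSeg2WS psList posList)

-- ===== LEMMAS AND PROOFS =====

-- A's loop, rephrased group-wise: pending word w and label t, remaining pairs
def pvGw (w t : String) : List (String × String) → List (String × String)
  | [] => [(w, t)]
  | (a, b) :: rest =>
    if PySem.Str.startswith b "B" then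
      (w, t) :: pvGw a (PySem.Str.slice b (some 2) none) rest
    else
      pvGw (w ++ a) t rest

-- join + filter emission shared by both characterisations
def pvEmit (gs : List (String × String)) : List String × List String :=
  ((gs.filter (fun g => g.1 ≠ "")).map (·.1), (gs.filter (fun g => g.1 ≠ "")).map (·.2))

theorem pvJoinE (l : List String) (a : String) :
    PySem.Str.join "" (a :: l) = a ++ PySem.Str.join "" l := by
  rw [← String.toList_inj]
  cases l with
  | nil => simp [PySem.Chars.join_singleton, PySem.Chars.join_nil]
  | cons b bs => simp [PySem.Chars.join_cons_cons]

theorem pvJoinNil : PySem.Str.join "" ([] : List String) = "" := by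
  rw [← String.toList_inj]; simp [PySem.Chars.join_nil]

theorem pvL1 (pairs : List (String × String)) :
    ∀ (ws ps : List String) (w t : String),
      pvFinA (pairs.foldl pvStepA (ws, ps, w, t)) =
        (ws ++ (pvEmit (pvGw w t pairs)).1, ps ++ (pvEmit (pvGw w t pairs)).2) := by
  induction pairs with
  | nil =>
    intro ws ps w t
    by_cases hw : w = "" <;> simp [pvFinA, pvGw, pvEmit, hw]
  | cons pr rest ih =>
    intro ws ps w t
    obtain ⟨a, b⟩ := pr
    simp only [List.foldl_cons, pvStepA]
    by_cases hb : PySem.Chars.startswith b.toList ['B'] = true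
    · by_cases hw : w = ""
      · simp [hb, hw, ih, pvGw, pvEmit]
      · simp [hb, hw, ih, pvGw, pvEmit]
    · simp [hb, ih, pvGw, pvEmit]

theorem pvL2 (pairs : List (String × String)) :
    ∀ (w t : String),
      pvGw w t pairs =
        (w ++ PySem.Str.join "" ((pairs.takeWhile (fun pr => !PySem.Str.startswith pr.2 "B")).map (·.1)), t)
          :: pvGroupsB (pairs.dropWhile (fun pr => !PySem.Str.startswith pr.2 "B")) := by
  induction pairs with
  | nil => intro w t; simp [pvGw, pvGroupsB, pvJoinNil]
  | cons pr rest ih =>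
    intro w t
    obtain ⟨a, b⟩ := pr
    by_cases hb : PySem.Chars.startswith b.toList ['B'] = true
    · simp [pvGw, pvGroupsB, hb, ih, pvSpanNonB, List.span_eq_takeWhile_dropWhile,
        pvJoinNil]
    · simp [pvGw, hb, ih, pvJoinE, String.append_assoc]

theorem pvL3 (pairs : List (String × String)) :
    pvEmit (pvGw "" "" pairs) = pvEmit (pvGroupsB pairs) := by
  cases pairs with
  | nil => simp [pvGw, pvGroupsB, pvEmit]
  | cons pr rest =>
    obtain ⟨a, b⟩ := pr
    rw [pvL2]
    by_cases hb : PySem.Chars.startswith b.toList ['B'] = true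
    · simp [hb, pvEmit, pvJoinNil]
    · simp [hb, pvGroupsB, pvSpanNonB, List.span_eq_takeWhile_dropWhile, pvJoinE, pvEmit]

-- ===== VERDICT (by name: the statement is the Claim_ definition above) =====
theorem psSeg2WS_spec : Claim_equal_psSeg2WS := by
  intro psList posList _
  unfold Spec_psSeg2WS psSeg2WS psSeg2WS_alt
  rw [pvL1, pvL3]
  simp [pvEmit]
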